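-- pv_equiv track=rewrite | github.com/Charybdis2/Chess-Checker | main.py | check_diagonalW
-- ===== SOURCE A (Python) =====
-- def get_piece(board, r, c):
--     #to make sure the code doesn't break if it tries to check if there is a knight or any piece off the board
--     if r < 0 or r >7 or c > 7 or c < 0:
--         return "."
--     return board[r][c]
--
-- def check_diagonalW(board, kr, kc):
--     for ro, co in [(1,1), (-1,1), (-1,-1), (1,-1)]:
--         r = kr
--         c = kc
--         while r >= 0 and r <=7 and c>=0 and c<=7:
--             r = r+ro
--             c = c+co
--             piece = get_piece(board, r, c)
--             if piece == "q" or piece == "b":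
--                  return True
--             if piece != ".":
--                 break
--     return False
-- ===== SOURCE B (Python) =====
-- def check_diagonalW(board, kr, kc):
--     # Concentric ring scan: expand distance d = 1..7 across all four
--     # diagonal directions at once, keeping only the directions that are
--     # still open (on the board and unblocked so far).
--     if kr < 0 or kr > 7 or kc < 0 or kc > 7:
--         return False
--     open_dirs = [(1, 1), (-1, 1), (-1, -1), (1, -1)]
--     for d in range(1, 8):
--         if not open_dirs:
--             break
--         still = []
--         for ro, co in open_dirs:
--             r = kr + d * ro
--             c = kc + d * co
--             if r < 0 or r > 7 or c < 0 or c > 7: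
--                 continue  # ran off the board: direction closes
--             piece = board[r][c]
--             if piece == "q" or piece == "b":
--                 return True
--             if piece == ".":
--                 still.append((ro, co))
--             # any other piece blocks: direction closes
--         open_dirs = still
--     return False
-- ===== Notes on version B (the rewrite author's own statement) =====
-- stated objective: alternative
-- what changed: Replaced four independent ray walks (a while loop per direction, scanning each diagonal to completion) by a single concentric ring scan over distances 1..7 that maintains the set of still-open diagonal directions, dropping a direction when it leaves the board or is blocked.
-- outside the precondition, e.g. on check_diagonalW(['........', '.r'], 0, 0): A returns False, B returns False; on check_diagonalW(['', '....', '....', '...q'], 1, 1): A returns True, B raises IndexError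
import Mathlib
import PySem

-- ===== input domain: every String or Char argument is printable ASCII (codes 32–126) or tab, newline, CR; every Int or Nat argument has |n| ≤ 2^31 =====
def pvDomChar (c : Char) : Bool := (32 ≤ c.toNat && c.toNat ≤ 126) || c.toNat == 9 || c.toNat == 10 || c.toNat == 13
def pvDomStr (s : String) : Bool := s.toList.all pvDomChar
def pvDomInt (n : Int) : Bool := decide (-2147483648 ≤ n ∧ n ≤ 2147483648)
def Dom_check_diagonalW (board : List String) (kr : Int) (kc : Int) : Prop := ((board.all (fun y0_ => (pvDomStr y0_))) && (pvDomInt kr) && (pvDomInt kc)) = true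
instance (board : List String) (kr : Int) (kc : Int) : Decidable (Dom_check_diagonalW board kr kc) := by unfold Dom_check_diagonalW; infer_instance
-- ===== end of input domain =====

-- B replaces A's four independent ray walks by one concentric ring scan (distance 1..7)
-- over the set of still-open diagonal directions; same return value (objective: alternative).

-- ===== PORT A =====
-- get_piece: '.' off the 8x8 square, else board[r][c] ('?' marks the IndexError Python
-- raises on a too-short board/row; such accesses are excluded by Pre_check_diagonalW).
def get_piece (board : List String) (r : Int) (c : Int) : Char :=
  if r < 0 ∨ 7 < r ∨ 7 < c ∨ c < 0 then '.'
  else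
    match PySem.List.pyGet? board r with
    | none => '?'
    | some row =>
      match PySem.Str.pyGet? row c with
      | none => '?'
      | some ch => ch

-- the while loop of A for one direction; fuel 9 bounds the ≤ 8 in-board iterations
def rayA (board : List String) (ro : Int) (co : Int) : Int → Int → Nat → Bool
  | _, _, 0 => false
  | r, c, f + 1 =>
    if 0 ≤ r ∧ r ≤ 7 ∧ 0 ≤ c ∧ c ≤ 7 then
      let r' := r + ro
      let c' := c + co
      let piece := get_piece board r' c'
      if piece = 'q' ∨ piece = 'b' then true
      else if piece ≠ '.' then false
      else rayA board ro co r' c' f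
    else false

def check_diagonalW (board : List String) (kr : Int) (kc : Int) : Bool :=
  [((1:Int),(1:Int)), (-1,1), (-1,-1), (1,-1)].any (fun p => rayA board p.1 p.2 kr kc 9)

-- ===== PORT B =====
-- board[r][c] for B (B checks 0 ≤ r,c ≤ 7 itself before reading; '?' = IndexError, outside Pre_)
def cellB (board : List String) (r : Int) (c : Int) : Char :=
  match PySem.List.pyGet? board r with
  | none => '?'
  | some row =>
    match PySem.Str.pyGet? row c with
    | none => '?'
    | some ch => ch

-- one ring at distance d: none = attacker found, some o = directions still open
def ringOnce (board : List String) (kr : Int) (kc : Int) (d : Int) : List (Int × Int) → Option (List (Int × Int))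
  | [] => some []
  | p :: rest =>
    let r := kr + d * p.1
    let c := kc + d * p.2
    if r < 0 ∨ 7 < r ∨ c < 0 ∨ 7 < c then ringOnce board kr kc d rest
    else
      let piece := cellB board r c
      if piece = 'q' ∨ piece = 'b' then none
      else if piece = '.' then (ringOnce board kr kc d rest).map (fun o => p :: o)
      else ringOnce board kr kc d rest

-- the for-d loop of B over the remaining distances
def ringB (board : List String) (kr : Int) (kc : Int) : List Int → List (Int × Int) → Bool
  | [], _ => false
  | d :: ds, op =>
    if op.isEmpty then false
    else
      match ringOnce board kr kc d op with
      | none => true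
      | some o => ringB board kr kc ds o

def check_diagonalW_alt (board : List String) (kr : Int) (kc : Int) : Bool :=
  if kr < 0 ∨ 7 < kr ∨ kc < 0 ∨ 7 < kc then false
  else ringB board kr kc (PySem.List.pyRange 1 8 1) [((1:Int),(1:Int)), (-1,1), (-1,-1), (1,-1)]

-- ===== PRECONDITION & SPEC =====
-- Pre_ excludes boards on which the scan can reach a missing cell of the 8x8 square
-- (short board or short row), where Python raises IndexError; it conservatively requires
-- every diagonal cell of the king's square to exist, even those past an early blocker
-- (cells A never reads because it breaks first) — a deliberate, stated narrowing.
def Pre_check_diagonalW (board : List String) (kr : Int) (kc : Int) : Prop :=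
  kr < 0 ∨ 7 < kr ∨ kc < 0 ∨ 7 < kc ∨
  ∀ r ∈ List.range 8, ∀ c ∈ List.range 8,
    ((r : Int) - kr).natAbs = ((c : Int) - kc).natAbs → ¬((r : Int) = kr ∧ (c : Int) = kc) →
    r < board.length ∧ c < (board.getD r "").toList.length
instance (board : List String) (kr : Int) (kc : Int) : Decidable (Pre_check_diagonalW board kr kc) := by
  unfold Pre_check_diagonalW; infer_instance

def pvWitness_check_diagonalW : List String × Int × Int :=
  (["........", "........", "........", "........", "...k....", "........", "b.......", "........"], 4, 3)

def Spec_check_diagonalW (board : List String) (kr : Int) (kc : Int) (out : Bool) : Prop := out = check_diagonalW_alt board kr kc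
instance (board : List String) (kr : Int) (kc : Int) (out : Bool) : Decidable (Spec_check_diagonalW board kr kc out) := by unfold Spec_check_diagonalW; infer_instance

-- ===== CLAIM (what is proved, stated in full; the proofs are below) =====
def Claim_equal_check_diagonalW : Prop := ∀ (board : List String) (kr : Int) (kc : Int), Dom_check_diagonalW board kr kc → Pre_check_diagonalW board kr kc → Spec_check_diagonalW board kr kc (check_diagonalW board kr kc)

-- ===== LEMMAS AND PROOFS =====

-- a state off the 8x8 square makes A's while loop return false, whatever the fuel
lemma rayA_out (board : List String) (ro co r c : Int) (f : Nat)
    (h : ¬(0 ≤ r ∧ r ≤ 7 ∧ 0 ≤ c ∧ c ≤ 7)) : rayA board ro co r c f = false := by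
  cases f with
  | zero => rfl
  | succ f => simp [rayA, h]

lemma gp_out (board : List String) (r c : Int) (h : r < 0 ∨ 7 < r ∨ 7 < c ∨ c < 0) :
    get_piece board r c = '.' := by simp [get_piece, h]

lemma gp_inb (board : List String) (r c : Int) (h : ¬(r < 0 ∨ 7 < r ∨ 7 < c ∨ c < 0)) :
    get_piece board r c = cellB board r c := by
  simp only [get_piece, cellB, if_neg h]

-- one unfolding of A's while loop body (definitional)
lemma rayA_unfold (board : List String) (ro co r c : Int) (f : Nat) :
    rayA board ro co r c (f + 1) =
    if 0 ≤ r ∧ r ≤ 7 ∧ 0 ≤ c ∧ c ≤ 7 then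
      (if get_piece board (r + ro) (c + co) = 'q' ∨ get_piece board (r + ro) (c + co) = 'b' then true
       else if get_piece board (r + ro) (c + co) ≠ '.' then false
       else rayA board ro co (r + ro) (c + co) f)
    else false := rfl

-- fuel irrelevance: one more unit of fuel changes nothing once the fuel covers the
-- remaining in-board row distance
lemma rayA_fuel (board : List String) (ro co : Int) (hro : ro = 1 ∨ ro = -1) :
    ∀ (f : Nat) (r c : Int), (if ro = 1 then 8 - r else r + 1) ≤ (f : Int) + 1 →
    rayA board ro co r c f = rayA board ro co r c (f + 1) := by
  intro f
  induction f with
  | zero =>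
    intro r c hμ
    by_cases hin : 0 ≤ r ∧ r ≤ 7 ∧ 0 ≤ c ∧ c ≤ 7
    · have hout : r + ro < 0 ∨ 7 < r + ro ∨ 7 < c + co ∨ c + co < 0 := by
        rcases hro with h1 | h1 <;> rw [h1] at hμ ⊢ <;> simp at hμ <;> omega
      simp [rayA, hin, gp_out board _ _ hout]
    · simp [rayA, hin]
  | succ f ih =>
    intro r c hμ
    by_cases hin : 0 ≤ r ∧ r ≤ 7 ∧ 0 ≤ c ∧ c ≤ 7
    · have hμ' : (if ro = 1 then 8 - (r + ro) else (r + ro) + 1) ≤ (f : Int) + 1 := by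
        rcases hro with h1 | h1 <;> rw [h1] at hμ ⊢ <;> simp at hμ ⊢ <;> push_cast at * <;> omega
      show rayA board ro co r c (f + 1) = rayA board ro co r c (f + 1 + 1)
      rw [rayA_unfold]
      rw [rayA_unfold]
      rw [if_pos hin, if_pos hin]
      exact if_congr Iff.rfl rfl (if_congr Iff.rfl rfl (ih (r + ro) (c + co) hμ'))
    · simp [rayA, hin]

-- directions kept by a ring are a subset of the open ones and in-board at distance d
lemma ringOnce_some_inb (board : List String) (kr kc d : Int) :
    ∀ (op o : List (Int × Int)), ringOnce board kr kc d op = some o →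
    ∀ p ∈ o, ¬(kr + d * p.1 < 0 ∨ 7 < kr + d * p.1 ∨ kc + d * p.2 < 0 ∨ 7 < kc + d * p.2) := by
  intro op
  induction op with
  | nil => intro o h p hp; simp [ringOnce] at h; subst h; simp at hp
  | cons q rest ih =>
    intro o h p hp
    simp only [ringOnce] at h
    split at h
    · exact ih o h p hp
    · split at h
      · exact absurd h (by simp)
      · split at h
        · rcases ho : ringOnce board kr kc d rest with _ | o'
          · rw [ho] at h; simp at h
          · rw [ho] at h
            simp at h
            subst h
            rcases List.mem_cons.mp hp with h1 | h1
            · subst h1; assumption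
            · exact ih o' ho p h1
        · exact ih o h p hp

-- one ring at distance d, matched against one unfolding of every open ray of A
lemma ringOnce_step (board : List String) (kr kc d : Int) (f : Nat) :
    ∀ (op : List (Int × Int)),
    (∀ p ∈ op, 0 ≤ kr + (d - 1) * p.1 ∧ kr + (d - 1) * p.1 ≤ 7 ∧ 0 ≤ kc + (d - 1) * p.2 ∧ kc + (d - 1) * p.2 ≤ 7) →
    (match ringOnce board kr kc d op with
     | none => true
     | some o => o.any (fun p => rayA board p.1 p.2 (kr + d * p.1) (kc + d * p.2) f))
    = op.any (fun p => rayA board p.1 p.2 (kr + (d - 1) * p.1) (kc + (d - 1) * p.2) (f + 1)) := by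
  intro op
  induction op with
  | nil => intro _; simp [ringOnce]
  | cons q rest ih =>
    intro H
    have Hq := H q (by simp)
    have Hrest : ∀ p ∈ rest, 0 ≤ kr + (d - 1) * p.1 ∧ kr + (d - 1) * p.1 ≤ 7 ∧ 0 ≤ kc + (d - 1) * p.2 ∧ kc + (d - 1) * p.2 ≤ 7 :=
      fun p hp => H p (List.mem_cons_of_mem _ hp)
    have hstep : kr + (d - 1) * q.1 + q.1 = kr + d * q.1 := by ring
    have hstep' : kc + (d - 1) * q.2 + q.2 = kc + d * q.2 := by ring
    -- A's ray for q unfolds once: the guard is Hq, the probed cell is the ring cell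
    have hun : rayA board q.1 q.2 (kr + (d - 1) * q.1) (kc + (d - 1) * q.2) (f + 1)
        = (let piece := get_piece board (kr + d * q.1) (kc + d * q.2)
           if piece = 'q' ∨ piece = 'b' then true
           else if piece ≠ '.' then false
           else rayA board q.1 q.2 (kr + d * q.1) (kc + d * q.2) f) := by
      simp only [rayA, if_pos Hq, hstep, hstep']
    simp only [ringOnce]
    by_cases hoff : kr + d * q.1 < 0 ∨ 7 < kr + d * q.1 ∨ kc + d * q.2 < 0 ∨ 7 < kc + d * q.2
    · -- q runs off the board: its ray probes '.', then dies on the guard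
      have hray0 : rayA board q.1 q.2 (kr + d * q.1) (kc + d * q.2) f = false :=
        rayA_out board q.1 q.2 (kr + d * q.1) (kc + d * q.2) f (by omega)
      have : rayA board q.1 q.2 (kr + (d - 1) * q.1) (kc + (d - 1) * q.2) (f + 1) = false := by
        rw [hun, gp_out board (kr + d * q.1) (kc + d * q.2) (by omega)]
        simp [hray0]
      simp only [if_pos hoff, List.any_cons, this, Bool.false_or]
      exact ih Hrest
    · have hcell : get_piece board (kr + d * q.1) (kc + d * q.2) = cellB board (kr + d * q.1) (kc + d * q.2) :=
        gp_inb board _ _ (by omega)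
      rw [if_neg hoff]
      by_cases hqb : cellB board (kr + d * q.1) (kc + d * q.2) = 'q' ∨ cellB board (kr + d * q.1) (kc + d * q.2) = 'b'
      · have : rayA board q.1 q.2 (kr + (d - 1) * q.1) (kc + (d - 1) * q.2) (f + 1) = true := by
          rw [hun, hcell]; simp [hqb]
        simp [hqb, this]
      · by_cases hdot : cellB board (kr + d * q.1) (kc + d * q.2) = '.'
        · -- empty cell: q stays open; its ray recurses to distance d
          have hq' : rayA board q.1 q.2 (kr + (d - 1) * q.1) (kc + (d - 1) * q.2) (f + 1)
              = rayA board q.1 q.2 (kr + d * q.1) (kc + d * q.2) f := by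
            rw [hun, hcell, hdot]; simp
          rw [if_neg hqb, if_pos hdot]
          have ihr := ih Hrest
          rcases ho : ringOnce board kr kc d rest with _ | o'
          · rw [ho] at ihr
            simp only at ihr
            simp [List.any_cons, ← ihr]
          · rw [ho] at ihr
            simp only at ihr
            simp [List.any_cons, ihr, hq']
        · -- blocker: q's ray breaks, q closes
          have : rayA board q.1 q.2 (kr + (d - 1) * q.1) (kc + (d - 1) * q.2) (f + 1) = false := by
            rw [hun, hcell]; simp [hqb, hdot]
          simp only [if_neg hqb, if_neg hdot, List.any_cons, this, Bool.false_or]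
          exact ih Hrest

-- the whole ring scan from distance d = 8 - n equals A's open rays with fuel n
lemma ring_eq (board : List String) (kr kc : Int) :
    ∀ (n : Nat) (d : Int) (op : List (Int × Int)), d = 8 - n →
    (∀ p ∈ op, 0 ≤ kr + (d - 1) * p.1 ∧ kr + (d - 1) * p.1 ≤ 7 ∧ 0 ≤ kc + (d - 1) * p.2 ∧ kc + (d - 1) * p.2 ≤ 7) →
    ringB board kr kc (PySem.List.pyRange d 8 1) op
      = op.any (fun p => rayA board p.1 p.2 (kr + (d - 1) * p.1) (kc + (d - 1) * p.2) n) := by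
  intro n
  induction n with
  | zero =>
    intro d op hd _
    subst hd
    norm_num
    simp [ringB, rayA]
  | succ n ih =>
    intro d op hd H
    have hlt : d < 8 := by omega
    rw [PySem.List.pyRange_one_cons hlt]
    simp only [ringB]
    by_cases hop : op.isEmpty
    · rw [if_pos hop]
      rw [List.isEmpty_iff.mp hop]
      simp
    · rw [if_neg hop]
      have hstep := ringOnce_step board kr kc d n op H
      rcases ho : ringOnce board kr kc d op with _ | o
      · rw [ho] at hstep; simp only at hstep; exact hstep
      · rw [ho] at hstep
        simp only at hstep
        have Ho : ∀ p ∈ o, 0 ≤ kr + (d + 1 - 1) * p.1 ∧ kr + (d + 1 - 1) * p.1 ≤ 7 ∧ 0 ≤ kc + (d + 1 - 1) * p.2 ∧ kc + (d + 1 - 1) * p.2 ≤ 7 := by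
          intro p hp
          have h8 := ringOnce_some_inb board kr kc d op o ho p hp
          simp only [show d + 1 - 1 = d from by ring]
          omega
        show ringB board kr kc (PySem.List.pyRange (d + 1) 8) o = _
        rw [ih (d + 1) o (by omega) Ho]
        simp only [show d + 1 - 1 = d from by ring]
        exact hstep

-- fuel 7 (B's seven rings) and fuel 9 (A's port) agree from an in-board king
lemma rayA_7_9 (board : List String) (ro co kr kc : Int) (hro : ro = 1 ∨ ro = -1)
    (hk : 0 ≤ kr ∧ kr ≤ 7) : rayA board ro co kr kc 7 = rayA board ro co kr kc 9 := by
  have hμ : (if ro = 1 then 8 - kr else kr + 1) ≤ (8 : Int) := by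
    rcases hro with h | h <;> rw [h] <;> simp <;> omega
  have h78 := rayA_fuel board ro co hro 7 kr kc (by simpa using (by omega : (if ro = 1 then 8 - kr else kr + 1) ≤ (7 : Int) + 1))
  have h89 := rayA_fuel board ro co hro 8 kr kc (by simpa using (by omega : (if ro = 1 then 8 - kr else kr + 1) ≤ (8 : Int) + 1))
  rw [h78, h89]

-- the two ports agree on every input (Pre_ is only needed for faithfulness to Python,
-- where A raises IndexError on boards Pre_ excludes)
lemma ports_eq (board : List String) (kr kc : Int) :
    check_diagonalW board kr kc = check_diagonalW_alt board kr kc := by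
  unfold check_diagonalW check_diagonalW_alt
  by_cases hk : kr < 0 ∨ 7 < kr ∨ kc < 0 ∨ 7 < kc
  · rw [if_pos hk]
    have h : ∀ ro co : Int, rayA board ro co kr kc 9 = false := fun ro co =>
      rayA_out board ro co kr kc 9 (by omega)
    simp [List.any_cons, h]
  · rw [if_neg hk]
    have H : ∀ p ∈ [((1:Int),(1:Int)), (-1,1), (-1,-1), (1,-1)],
        0 ≤ kr + ((1:Int) - 1) * p.1 ∧ kr + ((1:Int) - 1) * p.1 ≤ 7 ∧ 0 ≤ kc + ((1:Int) - 1) * p.2 ∧ kc + ((1:Int) - 1) * p.2 ≤ 7 := by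
      intro p _
      have h1 : kr + ((1:Int) - 1) * p.1 = kr := by ring
      have h2 : kc + ((1:Int) - 1) * p.2 = kc := by ring
      rw [h1, h2]
      omega
    rw [ring_eq board kr kc 7 1 _ (by norm_num) H]
    simp only [List.any_cons, List.any_nil]
    norm_num
    rw [rayA_7_9 board 1 1 kr kc (Or.inl rfl) ⟨by omega, by omega⟩,
        rayA_7_9 board (-1) 1 kr kc (Or.inr rfl) ⟨by omega, by omega⟩,
        rayA_7_9 board (-1) (-1) kr kc (Or.inr rfl) ⟨by omega, by omega⟩,
        rayA_7_9 board 1 (-1) kr kc (Or.inl rfl) ⟨by omega, by omega⟩]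

-- ===== VERDICT (by name: the statement is the Claim_ definition above) =====
theorem check_diagonalW_spec : Claim_equal_check_diagonalW := by
  intro board kr kc _ _
  unfold Spec_check_diagonalW
  exact ports_eq board kr kc
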